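-- pv_equiv track=rewrite | github.com/spenht/event-ai-ops-v2 | app/services/openai_chat.py | strip_tokens
-- ===== SOURCE A (Python) =====
-- TOKENS = {
--     "SEND_VIP_LINK": "[[SEND_VIP_LINK]]",
--     "SEND_VIP_VIDEO": "[[SEND_VIP_VIDEO]]",
--     "SEND_GENERAL_TICKET": "[[SEND_GENERAL_TICKET]]",
-- }
--
-- def strip_tokens(text: str) -> tuple[str, set[str]]:
--     found: set[str] = set()
--     out = (text or "").strip()
--     for t in TOKENS.values():
--         if t in out:
--             found.add(t)
--             out = out.replace(t, "")
--     out = "\n".join([ln.rstrip() for ln in out.splitlines() if ln.strip()])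
--     return out.strip(), found
-- ===== SOURCE B (Python) =====
-- TOKENS = {
--     "SEND_VIP_LINK": "[[SEND_VIP_LINK]]",
--     "SEND_VIP_VIDEO": "[[SEND_VIP_VIDEO]]",
--     "SEND_GENERAL_TICKET": "[[SEND_GENERAL_TICKET]]",
-- }
--
-- def strip_tokens(text: str) -> tuple[str, set[str]]:
--     # One pass over the lines: tokens are removed per line (they contain no
--     # line breaks) while the line is cleaned, instead of three whole-text
--     # replace passes followed by a separate line pass.
--     t1, t2, t3 = TOKENS.values()
--     f1 = f2 = f3 = False
--     kept: list[str] = []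
--     for ln in (text or "").strip().splitlines():
--         if t1 in ln:
--             f1 = True
--             ln = ln.replace(t1, "")
--         if t2 in ln:
--             f2 = True
--             ln = ln.replace(t2, "")
--         if t3 in ln:
--             f3 = True
--             ln = ln.replace(t3, "")
--         ln = ln.rstrip()
--         if ln:
--             kept.append(ln)
--     found = {t for t, f in ((t1, f1), (t2, f2), (t3, f3)) if f}
--     return "\n".join(kept).strip(), found
-- ===== Notes on version B (the rewrite author's own statement) =====
-- stated objective: alternative
-- what changed: B splits the stripped text into lines first and makes one pass over them, removing the tokens inside each line and cleaning/filtering the line in the same step (tokens contain no line breaks), instead of A's three whole-text membership-and-replace passes followed by a separate splitlines/rstrip/filter pass.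
import Mathlib
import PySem

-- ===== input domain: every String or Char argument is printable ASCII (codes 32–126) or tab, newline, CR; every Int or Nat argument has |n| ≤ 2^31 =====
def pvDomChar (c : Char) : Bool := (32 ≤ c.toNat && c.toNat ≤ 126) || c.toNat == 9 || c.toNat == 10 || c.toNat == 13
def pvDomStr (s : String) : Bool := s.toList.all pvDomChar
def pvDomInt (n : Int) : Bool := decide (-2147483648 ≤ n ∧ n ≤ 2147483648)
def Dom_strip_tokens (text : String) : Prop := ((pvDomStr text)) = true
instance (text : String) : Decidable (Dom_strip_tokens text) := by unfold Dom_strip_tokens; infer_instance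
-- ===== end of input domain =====

-- B makes one pass over the lines, removing the tokens inside each line while cleaning it,
-- instead of A's three whole-text membership-and-replace passes followed by a separate line pass.

-- ===== PORT A =====
-- the module-level TOKENS dict: only its values are ever used
def pyTOK1 : String := "[[SEND_VIP_LINK]]"
def pyTOK2 : String := "[[SEND_VIP_VIDEO]]"
def pyTOK3 : String := "[[SEND_GENERAL_TICKET]]"
def pyTokenValues : List String := [pyTOK1, pyTOK2, pyTOK3]

-- body of A's `for t in TOKENS.values()` loop
def pyStepA (st : PySem.Set String × String) (t : String) : PySem.Set String × String :=
  if PySem.Str.isIn t st.2 then (PySem.Set.add st.1 t, PySem.Str.replace st.2 t "") else st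

def strip_tokens (text : String) : String × List String :=
  let out0 := PySem.Str.strip (if text == "" then "" else text)
  let st := List.foldl pyStepA (PySem.Set.empty, out0) pyTokenValues
  let lines := ((PySem.Str.splitlines st.2).filter (fun ln => !(PySem.Str.strip ln == ""))).map PySem.Str.rstrip
  (PySem.Str.strip (PySem.Str.join "\n" lines), st.1)

-- ===== PORT B =====
-- body of B's `for ln in ...` loop
def pyStepB (st : List String × Bool × Bool × Bool) (ln : String) : List String × Bool × Bool × Bool :=
  let f1 := if PySem.Str.isIn pyTOK1 ln then true else st.2.1
  let ln1 := if PySem.Str.isIn pyTOK1 ln then PySem.Str.replace ln pyTOK1 "" else ln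
  let f2 := if PySem.Str.isIn pyTOK2 ln1 then true else st.2.2.1
  let ln2 := if PySem.Str.isIn pyTOK2 ln1 then PySem.Str.replace ln1 pyTOK2 "" else ln1
  let f3 := if PySem.Str.isIn pyTOK3 ln2 then true else st.2.2.2
  let ln3 := if PySem.Str.isIn pyTOK3 ln2 then PySem.Str.replace ln2 pyTOK3 "" else ln2
  let r := PySem.Str.rstrip ln3
  (if r == "" then st.1 else st.1 ++ [r], f1, f2, f3)

def strip_tokens_alt (text : String) : String × List String :=
  let st := List.foldl pyStepB ([], false, false, false)
    (PySem.Str.splitlines (PySem.Str.strip (if text == "" then "" else text)))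
  let found : PySem.Set String :=
    PySem.Set.ofList ((([(pyTOK1, st.2.1), (pyTOK2, st.2.2.1), (pyTOK3, st.2.2.2)]).filter (fun p => p.2)).map (fun p => p.1))
  (PySem.Str.strip (PySem.Str.join "\n" st.1), found)

-- ===== PRECONDITION & SPEC =====
def Spec_strip_tokens (text : String) (out : String × List String) : Prop := out = strip_tokens_alt text
instance (text : String) (out : String × List String) : Decidable (Spec_strip_tokens text out) := by unfold Spec_strip_tokens; infer_instance

-- ===== CLAIM (what is proved, stated in full; the proofs are below) =====
def Claim_equal_strip_tokens : Prop := ∀ (text : String), Dom_strip_tokens text → Spec_strip_tokens text (strip_tokens text)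

-- ===== LEMMAS AND PROOFS =====

-- the tokens' char lists
def pvL1 : List Char := pyTOK1.toList
def pvL2 : List Char := pyTOK2.toList
def pvL3 : List Char := pyTOK3.toList

-- the line-break test used by Python's str.splitlines (same test as PySem.Chars.splitlines uses)
def pvBrk (c : Char) : Bool :=
  decide (c.toNat = 10) || decide (c.toNat = 13) || decide (c.toNat = 11) || decide (c.toNat = 12) ||
  decide (c.toNat = 28) || decide (c.toNat = 29) || decide (c.toNat = 30) || decide (c.toNat = 133) ||
  decide (c.toNat = 8232) || decide (c.toNat = 8233)

-- prepend to the first segment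
def pvConsHead (u : List Char) : List (List Char) → List (List Char)
  | [] => [u]
  | l :: ls => (u ++ l) :: ls

-- splitlines, but keeping the final (possibly empty) segment
def pvSplitAll : List Char → List (List Char)
  | [] => [[]]
  | '\r' :: '\n' :: rest => [] :: pvSplitAll rest
  | c :: rest =>
      if pvBrk c then [] :: pvSplitAll rest
      else pvConsHead [c] (pvSplitAll rest)

-- drop the trailing segment iff it is empty (Python's splitlines keeps no trailing empty line)
def pvPeel : List (List Char) → List (List Char)
  | [] => []
  | [l] => if l.isEmpty then [] else [l]
  | l :: ls => l :: pvPeel ls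

-- structural form of s.replace(t, "")
def pvRem (t : List Char) : List Char → List Char
  | [] => []
  | c :: rest =>
    if h : t.isPrefixOf (c :: rest) ∧ t ≠ [] then pvRem t ((c :: rest).drop t.length)
    else c :: pvRem t rest
termination_by l => l.length
decreasing_by
  all_goals simp only [List.length_drop, List.length_cons]
  all_goals first
  | omega
  | (rcases h with ⟨hp, hne⟩
     cases t with
     | nil => exact absurd rfl hne
     | cons a t' => simp only [List.length_cons]; omega)

-- keep the nonempty segments
def pvFl (xs : List (List Char)) : List (List Char) := xs.filter (fun l => !l.isEmpty)

-- "contains no line-break character"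
def pvNB (t : List Char) : Prop := ∀ c ∈ t, pvBrk c = false

-- Str-level combinator: one conditional membership-and-replace step
def pvRS (t s : String) : String := if PySem.Str.isIn t s then PySem.Str.replace s t "" else s

-- the found-set as A accumulates it, as a function of the three membership flags
def pvFound (f1 f2 f3 : Bool) : PySem.Set String :=
  let fd1 : PySem.Set String := if f1 then PySem.Set.add PySem.Set.empty pyTOK1 else PySem.Set.empty
  let fd2 : PySem.Set String := if f2 then PySem.Set.add fd1 pyTOK2 else fd1
  if f3 then PySem.Set.add fd2 pyTOK3 else fd2

-- B's per-line predicates and line transformer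
def pvA1 (ln : String) : Bool := PySem.Str.isIn pyTOK1 ln
def pvA2 (ln : String) : Bool := PySem.Str.isIn pyTOK2 (pvRS pyTOK1 ln)
def pvA3 (ln : String) : Bool := PySem.Str.isIn pyTOK3 (pvRS pyTOK2 (pvRS pyTOK1 ln))
def pvFB (ln : String) : Option String :=
  if PySem.Str.rstrip (pvRS pyTOK3 (pvRS pyTOK2 (pvRS pyTOK1 ln))) == "" then none
  else some (PySem.Str.rstrip (pvRS pyTOK3 (pvRS pyTOK2 (pvRS pyTOK1 ln))))

-- Chars-level composites
def pvRem3 (cs : List Char) : List Char := pvRem pvL3 (pvRem pvL2 (pvRem pvL1 cs))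
def pvFC0 (cs : List Char) : Option (List Char) :=
  if PySem.Chars.rstrip cs = [] then none else some (PySem.Chars.rstrip cs)

lemma pvSplitAll_crlf (rest : List Char) : pvSplitAll ('\r' :: '\n' :: rest) = [] :: pvSplitAll rest := by
  simp [pvSplitAll]

lemma pvSplitAll_cons (c : Char) (rest : List Char)
    (hnp : ∀ (w : List Char), c = '\r' → rest = '\n' :: w → False) :
    pvSplitAll (c :: rest) = if pvBrk c then [] :: pvSplitAll rest else pvConsHead [c] (pvSplitAll rest) := by
  rw [pvSplitAll.eq_def]
  split
  · rename_i h; cases h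
  · rename_i h; injection h with h1 h2; exact (hnp _ h1 h2).elim
  · rename_i x c2 r2 hx heq; injection heq with e1 e2; subst e1; subst e2; rfl

lemma pvSplitAll_ne_nil (s : List Char) : pvSplitAll s ≠ [] := by
  induction s using pvSplitAll.induct with
  | case1 => simp [pvSplitAll]
  | case2 rest ih => simp [pvSplitAll]
  | case3 c rest hnp hb ih =>
    rw [pvSplitAll_cons c rest hnp, if_pos hb]
    simp
  | case4 c rest hnp hb ih =>
    rw [pvSplitAll_cons c rest hnp, if_neg hb]
    cases hx : pvSplitAll rest with
    | nil => simp [pvConsHead]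
    | cons l ls => simp [pvConsHead]

lemma pvConsHead_nil_ne (xs : List (List Char)) (hx : xs ≠ []) : pvConsHead [] xs = xs := by
  cases xs with
  | nil => exact absurd rfl hx
  | cons l ls => simp [pvConsHead]

lemma pvConsHead_consHead (u v : List Char) (xs : List (List Char)) :
    pvConsHead u (pvConsHead v xs) = pvConsHead (u ++ v) xs := by
  cases xs <;> simp [pvConsHead]

lemma pvPeel_cons_cons (x : List Char) (l : List Char) (ls : List (List Char)) :
    pvPeel (x :: l :: ls) = x :: pvPeel (l :: ls) := by
  simp [pvPeel]

lemma pvGo_eq (s : List Char) : ∀ cur acc,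
    PySem.Chars.splitlines.go pvBrk s cur acc =
      acc.reverse ++ pvPeel (pvConsHead cur.reverse (pvSplitAll s)) := by
  induction s using pvSplitAll.induct with
  | case1 =>
    intro cur acc
    rw [PySem.Chars.splitlines.go.eq_1]
    simp only [pvSplitAll, pvConsHead, List.append_nil]
    cases cur with
    | nil => simp [pvPeel]
    | cons c cs => simp [pvPeel]
  | case2 rest ih =>
    intro cur acc
    rw [PySem.Chars.splitlines.go.eq_2, ih, pvSplitAll_crlf]
    rcases List.exists_cons_of_ne_nil (pvSplitAll_ne_nil rest) with ⟨l, ls, hx⟩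
    rw [hx]
    simp only [pvConsHead, List.reverse_cons, pvPeel_cons_cons]
    simp
  | case3 c rest hnp hb ih =>
    intro cur acc
    rw [PySem.Chars.splitlines.go.eq_3 pvBrk cur acc c rest hnp, if_pos hb, ih,
      pvSplitAll_cons c rest hnp, if_pos hb]
    rcases List.exists_cons_of_ne_nil (pvSplitAll_ne_nil rest) with ⟨l, ls, hx2⟩
    rw [hx2]
    simp only [pvConsHead, List.reverse_cons, pvPeel_cons_cons]
    simp
  | case4 c rest hnp hb ih =>
    intro cur acc
    rw [PySem.Chars.splitlines.go.eq_3 pvBrk cur acc c rest hnp, if_neg hb, ih,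
      pvSplitAll_cons c rest hnp, if_neg hb, pvConsHead_consHead]
    simp

lemma pvSplitlines_eq (s : List Char) : PySem.Chars.splitlines s = pvPeel (pvSplitAll s) := by
  have h0 : PySem.Chars.splitlines s = PySem.Chars.splitlines.go pvBrk s [] [] := rfl
  rw [h0, pvGo_eq]
  simp only [List.reverse_nil, List.nil_append]
  rw [pvConsHead_nil_ne _ (pvSplitAll_ne_nil s)]

lemma pvPeel_spec (xs : List (List Char)) : xs = pvPeel xs ∨ xs = pvPeel xs ++ [[]] := by
  induction xs using pvPeel.induct with
  | case1 => left; rfl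
  | case2 l hl =>
    right
    simp only [pvPeel, if_pos hl, List.nil_append]
    simpa using hl
  | case3 l hl => left; simp [pvPeel, hl]
  | case4 l ls hne ih =>
    rcases List.exists_cons_of_ne_nil (fun h => hne h) with ⟨l2, ls2, hx⟩
    subst hx
    rcases ih with ih | ih
    · left; rw [pvPeel_cons_cons, ← ih]
    · right; rw [pvPeel_cons_cons]; conv_lhs => rw [ih]
      simp

lemma pvRem_nil (t : List Char) : pvRem t [] = [] := by simp [pvRem]

lemma pvRep_go_eq (t : List Char) (ht : t ≠ []) :
    ∀ (fuel : Nat) (l acc : List Char), l.length ≤ fuel →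
      PySem.Chars.replace.go t [] fuel l acc = acc.reverse ++ pvRem t l := by
  intro fuel
  induction fuel with
  | zero =>
    intro l acc hl
    have : l = [] := List.eq_nil_of_length_eq_zero (Nat.le_zero.1 hl)
    subst this
    rw [PySem.Chars.replace.go.eq_1]
    simp [pvRem_nil]
  | succ fuel ih =>
    intro l acc hl
    cases l with
    | nil =>
      rw [PySem.Chars.replace.go.eq_def]
      simp [pvRem_nil]
    | cons c rest =>
      rw [PySem.Chars.replace.go.eq_def]
      simp only []
      by_cases hp : t.isPrefixOf (c :: rest)
      · rw [if_pos hp]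
        have hlen : (List.drop t.length (c :: rest)).length ≤ fuel := by
          cases t with
          | nil => exact absurd rfl ht
          | cons a t' =>
            simp only [List.length_drop, List.length_cons] at *
            omega
        rw [ih _ _ hlen, pvRem.eq_2, dif_pos ⟨hp, ht⟩]
        simp
      · rw [if_neg hp]
        have hlen : rest.length ≤ fuel := by
          simp only [List.length_cons] at hl; omega
        rw [ih _ _ hlen, pvRem.eq_2, dif_neg (by simp [hp])]
        simp

lemma pvReplace_eq (t s : List Char) (ht : t ≠ []) :
    PySem.Chars.replace s t [] = pvRem t s := by
  have : PySem.Chars.replace s t [] =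
      if t.isEmpty then [] ++ List.flatMap (fun c => c :: []) s
      else PySem.Chars.replace.go t [] s.length s [] := rfl
  rw [this, if_neg (by simpa using ht), pvRep_go_eq t ht s.length s [] le_rfl]
  simp

lemma pvRem_of_not_infix (t s : List Char) (h : ¬ t <:+: s) : pvRem t s = s := by
  induction s using pvRem.induct t with
  | case1 => exact pvRem_nil t
  | case2 c rest hcond ih =>
    exact absurd ((List.isPrefixOf_iff_prefix.1 hcond.1).isInfix) h
  | case3 c rest hcond ih =>
    rw [pvRem.eq_2, dif_neg hcond, ih (fun hinf => h (hinf.trans (List.suffix_cons c rest).isInfix))]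

lemma pvRem_append_self (t l : List Char) (ht : t ≠ []) : pvRem t (t ++ l) = pvRem t l := by
  cases t with
  | nil => exact absurd rfl ht
  | cons a t' =>
    rw [List.cons_append, pvRem.eq_2, dif_pos ⟨by simpa using List.prefix_append (a :: t') l, ht⟩]
    simp

lemma pvBrk_not_cr {c : Char} (hc : pvBrk c = false) :
    ∀ (w : List Char) (rest : List Char), c = '\r' → rest = '\n' :: w → False := by
  intro w rest h1 _
  rw [h1] at hc
  exact absurd hc (by decide)

lemma pvSplitAll_cons_nb (c : Char) (rest : List Char) (hc : pvBrk c = false) :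
    pvSplitAll (c :: rest) = pvConsHead [c] (pvSplitAll rest) := by
  rw [pvSplitAll_cons c rest (fun w h1 h2 => pvBrk_not_cr hc w rest h1 h2), if_neg (by simp [hc])]

lemma pvSplitAll_append (u : List Char) (hu : pvNB u) :
    ∀ v, pvSplitAll (u ++ v) = pvConsHead u (pvSplitAll v) := by
  induction u with
  | nil =>
    intro v
    rw [List.nil_append, pvConsHead_nil_ne _ (pvSplitAll_ne_nil v)]
  | cons c u' ih =>
    intro v
    have hc : pvBrk c = false := hu c (by simp)
    rw [List.cons_append, pvSplitAll_cons_nb c (u' ++ v) hc,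
      ih (fun d hd => hu d (by simp [hd])) v, pvConsHead_consHead]
    rfl

lemma pvHead_prefix (v : List Char) : ∀ l ls, pvSplitAll v = l :: ls → l <+: v := by
  induction v using pvSplitAll.induct with
  | case1 =>
    intro l ls h
    simp only [pvSplitAll] at h
    injection h with h1 _
    subst h1; exact List.nil_prefix
  | case2 rest ih =>
    intro l ls h
    rw [pvSplitAll_crlf] at h
    injection h with h1 _
    subst h1; exact List.nil_prefix
  | case3 c rest hnp hb ih =>
    intro l ls h
    rw [pvSplitAll_cons c rest hnp, if_pos hb] at h
    injection h with h1 _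
    subst h1; exact List.nil_prefix
  | case4 c rest hnp hb ih =>
    intro l ls h
    rw [pvSplitAll_cons c rest hnp, if_neg hb] at h
    rcases List.exists_cons_of_ne_nil (pvSplitAll_ne_nil rest) with ⟨l0, ls0, hx⟩
    rw [hx] at h
    simp only [pvConsHead, List.cons_append, List.nil_append] at h
    injection h with h1 _
    subst h1
    exact List.cons_prefix_cons.2 ⟨rfl, ih l0 ls0 hx⟩

lemma pvPrefix_head (u : List Char) (hu : pvNB u) :
    ∀ v l ls, u <+: v → pvSplitAll v = l :: ls → u <+: l := by
  induction u with
  | nil => intro v l ls _ _; exact List.nil_prefix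
  | cons d u' ih =>
    intro v l ls hpre hsp
    obtain ⟨w, rfl⟩ := hpre
    have hd : pvBrk d = false := hu d (by simp)
    rw [List.cons_append, pvSplitAll_cons_nb d (u' ++ w) hd] at hsp
    rcases List.exists_cons_of_ne_nil (pvSplitAll_ne_nil (u' ++ w)) with ⟨l0, ls0, hx⟩
    rw [hx] at hsp
    simp only [pvConsHead, List.cons_append, List.nil_append] at hsp
    injection hsp with h1 _
    subst h1
    exact List.cons_prefix_cons.2
      ⟨rfl, ih (fun e he => hu e (by simp [he])) (u' ++ w) l0 ls0 (List.prefix_append u' w) hx⟩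

lemma pvBrk_cons_head (c : Char) (x : List Char) (hc : pvBrk c = true) :
    (pvSplitAll (c :: x)).head? = some [] := by
  by_cases hcr : c = '\r'
  · subst hcr
    cases x with
    | nil => rw [pvSplitAll_cons _ _ (by intro w h1 h2; cases h2), if_pos hc]; rfl
    | cons x0 xs =>
      by_cases hn : x0 = '\n'
      · subst hn; rw [pvSplitAll_crlf]; rfl
      · rw [pvSplitAll_cons _ _ (by intro w h1 h2; injection h2 with e1 _; exact hn e1), if_pos hc]
        rfl
  · rw [pvSplitAll_cons _ _ (fun w h1 _ => hcr h1), if_pos hc]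
    rfl

lemma pvFl_cons_nil (xs : List (List Char)) : pvFl ([] :: xs) = pvFl xs := by
  simp [pvFl]

lemma pvBrk_cons_map_Fl (g : List Char → List Char) (hg : g [] = []) (c : Char) (x : List Char)
    (hc : pvBrk c = true) :
    pvFl ((pvSplitAll (c :: x)).map g) = pvFl ((pvSplitAll x).map g) := by
  by_cases hcr : c = '\r'
  · subst hcr
    cases x with
    | nil => rw [pvSplitAll_cons _ _ (by intro w h1 h2; cases h2), if_pos hc]; simp [pvFl, hg]
    | cons x0 xs =>
      by_cases hn : x0 = '\n'
      · subst hn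
        rw [pvSplitAll_crlf, pvSplitAll_cons '\n' xs (by intro w h1 _; cases h1), if_pos (by decide)]
      · rw [pvSplitAll_cons _ _ (by intro w h1 h2; injection h2 with e1 _; exact hn e1), if_pos hc]
        simp only [List.map_cons, hg, pvFl_cons_nil]
  · rw [pvSplitAll_cons _ _ (fun w h1 _ => hcr h1), if_pos hc]
    simp only [List.map_cons, hg, pvFl_cons_nil]

lemma pvFl_cons (a : List Char) (xs : List (List Char)) :
    pvFl (a :: xs) = if a.isEmpty then pvFl xs else a :: pvFl xs := by
  cases ha : a.isEmpty <;> simp [pvFl, ha]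

lemma pvBrk_cons_Fl (c : Char) (x : List Char) (hc : pvBrk c = true) :
    pvFl (pvSplitAll (c :: x)) = pvFl (pvSplitAll x) := by
  have h := pvBrk_cons_map_Fl id rfl c x hc
  simpa using h

lemma pvMain (t : List Char) (ht : t ≠ []) (htb : pvNB t) : ∀ s : List Char,
    (pvSplitAll (pvRem t s)).head? = ((pvSplitAll s).map (pvRem t)).head? ∧
      pvFl (pvSplitAll (pvRem t s)) = pvFl ((pvSplitAll s).map (pvRem t)) := by
  intro s
  induction hs : s.length using Nat.strong_induction_on generalizing s with
  | _ n ih =>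
  cases s with
  | nil =>
    simp [pvRem_nil, pvSplitAll, pvFl]
  | cons c rest =>
    by_cases hp : t.isPrefixOf (c :: rest)
    · -- t is a prefix: s = t ++ l
      obtain ⟨l, hl⟩ := List.isPrefixOf_iff_prefix.1 hp
      have htpos : 0 < t.length := List.length_pos_of_ne_nil ht
      have hrem : pvRem t (c :: rest) = pvRem t l := by
        rw [pvRem.eq_2, dif_pos ⟨hp, ht⟩, ← hl, List.drop_left]
      have hlen : l.length < n := by
        have : t.length + l.length = n := by
          rw [← hs, ← hl]; simp
        omega
      have IH := ih l.length hlen l rfl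
      have hsa : pvSplitAll (c :: rest) = pvConsHead t (pvSplitAll l) := by
        rw [← hl, pvSplitAll_append t htb l]
      rcases List.exists_cons_of_ne_nil (pvSplitAll_ne_nil l) with ⟨l0, ls0, hx⟩
      have hmap : (pvSplitAll (c :: rest)).map (pvRem t) = (pvSplitAll l).map (pvRem t) := by
        rw [hsa, hx]
        simp only [pvConsHead, List.map_cons]
        rw [pvRem_append_self t l0 ht]
      rw [hrem, hmap]
      exact IH
    · have hrem : pvRem t (c :: rest) = c :: pvRem t rest := by
        rw [pvRem.eq_2, dif_neg (by simp [hp])]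
      have hlen : rest.length < n := by rw [← hs]; simp
      have IH := ih rest.length hlen rest rfl
      by_cases hb : pvBrk c
      · constructor
        · rw [hrem, pvBrk_cons_head c _ hb]
          have h2 : (pvSplitAll (c :: rest)).head? = some [] := pvBrk_cons_head c rest hb
          rw [List.head?_map, h2, Option.map_some, pvRem_nil]
        · rw [hrem, pvBrk_cons_Fl c _ hb, pvBrk_cons_map_Fl (pvRem t) (pvRem_nil t) c rest hb]
          exact IH.2
      · have hbf : pvBrk c = false := by simpa using hb
        rcases List.exists_cons_of_ne_nil (pvSplitAll_ne_nil rest) with ⟨l0, ls0, hx⟩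
        rcases List.exists_cons_of_ne_nil (pvSplitAll_ne_nil (pvRem t rest)) with ⟨m0, ms0, hy⟩
        have hm0 : m0 = pvRem t l0 := by
          have := IH.1
          rw [hy, hx] at this
          simpa using this
        have hremc : pvRem t (c :: l0) = c :: pvRem t l0 := by
          rw [pvRem.eq_2, dif_neg]
          intro hcon
          have h1 : t <+: c :: l0 := List.isPrefixOf_iff_prefix.1 hcon.1
          have h2 : l0 <+: rest := pvHead_prefix rest l0 ls0 hx
          exact hp (List.isPrefixOf_iff_prefix.2 (h1.trans (List.cons_prefix_cons.2 ⟨rfl, h2⟩)))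
        constructor
        · rw [hrem, pvSplitAll_cons_nb c _ hbf, pvSplitAll_cons_nb c _ hbf, hx, hy]
          simp only [pvConsHead, List.singleton_append, List.map_cons, List.head?_cons, hremc, hm0]
        · rw [hrem, pvSplitAll_cons_nb c _ hbf, pvSplitAll_cons_nb c _ hbf, hx, hy]
          simp only [pvConsHead, List.map_cons, List.singleton_append, List.cons_append,
            List.nil_append, hremc]
          rw [pvFl_cons, pvFl_cons, if_neg (by simp), if_neg (by simp)]
          have htail : pvFl ms0 = pvFl ((ls0.map (pvRem t))) := by
            have h2 := IH.2
            rw [hy, hx] at h2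
            simp only [List.map_cons] at h2
            rw [pvFl_cons, pvFl_cons, hm0] at h2
            by_cases he : (pvRem t l0).isEmpty
            · simpa [he] using h2
            · rw [if_neg (by simp [he]), if_neg (by simp [he])] at h2
              exact List.tail_eq_of_cons_eq h2
          rw [hm0, htail]

lemma pvNot_prefix_brk (t : List Char) (ht : t ≠ []) (htb : pvNB t) (c : Char)
    (hb : pvBrk c = true) (x : List Char) : ¬ t <+: (c :: x) := by
  cases t with
  | nil => exact absurd rfl ht
  | cons d t' =>
    intro hpre
    rcases List.cons_prefix_cons.1 hpre with ⟨rfl, _⟩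
    exact absurd (htb d (List.mem_cons_self ..)) (by simp [hb])

lemma pvInfix_splitAll (t : List Char) (ht : t ≠ []) (htb : pvNB t) (s : List Char) :
    t <:+: s ↔ ∃ seg ∈ pvSplitAll s, t <:+: seg := by
  induction s using pvSplitAll.induct with
  | case1 =>
    simp only [pvSplitAll, List.mem_singleton]
    constructor
    · intro h; exact ⟨[], rfl, h⟩
    · rintro ⟨seg, rfl, h⟩; exact h
  | case2 rest ih =>
    rw [pvSplitAll_crlf, List.infix_cons_iff, List.infix_cons_iff]
    have h1 := pvNot_prefix_brk t ht htb '\r' (by decide) ('\n' :: rest)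
    have h2 := pvNot_prefix_brk t ht htb '\n' (by decide) rest
    have h3 : ¬ t <:+: [] := by
      intro h; exact ht (List.eq_nil_of_infix_nil h)
    simp only [List.mem_cons, ih]
    constructor
    · rintro (h | h | h)
      · exact absurd h h1
      · exact absurd h h2
      · rcases h with ⟨seg, hm, hs⟩; exact ⟨seg, Or.inr hm, hs⟩
    · rintro ⟨seg, hm | hm, hs⟩
      · subst hm; exact absurd hs h3
      · exact Or.inr (Or.inr ⟨seg, hm, hs⟩)
  | case3 c rest hnp hb ih =>
    rw [pvSplitAll_cons c rest hnp, if_pos hb, List.infix_cons_iff]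
    have h1 := pvNot_prefix_brk t ht htb c hb rest
    have h3 : ¬ t <:+: [] := fun h => ht (List.eq_nil_of_infix_nil h)
    simp only [List.mem_cons, ih]
    constructor
    · rintro (h | h)
      · exact absurd h h1
      · rcases h with ⟨seg, hm, hs⟩; exact ⟨seg, Or.inr hm, hs⟩
    · rintro ⟨seg, hm | hm, hs⟩
      · subst hm; exact absurd hs h3
      · exact Or.inr ⟨seg, hm, hs⟩
  | case4 c rest hnp hb ih =>
    rcases List.exists_cons_of_ne_nil (pvSplitAll_ne_nil rest) with ⟨l0, ls0, hx⟩
    have hl0 : l0 <+: rest := pvHead_prefix rest l0 ls0 hx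
    have hkey : (t <+: c :: rest) ↔ (t <+: c :: l0) := by
      constructor
      · intro hpre
        cases t with
        | nil => exact List.nil_prefix
        | cons d t' =>
          rcases List.cons_prefix_cons.1 hpre with ⟨rfl, hpre'⟩
          exact List.cons_prefix_cons.2
            ⟨rfl, pvPrefix_head t' (fun e he => htb e (by simp [he])) rest l0 ls0 hpre' hx⟩
      · intro hpre
        exact hpre.trans (List.cons_prefix_cons.2 ⟨rfl, hl0⟩)
    rw [pvSplitAll_cons c rest hnp, if_neg hb, hx]
    simp only [pvConsHead, List.singleton_append, List.mem_cons]
    rw [List.infix_cons_iff]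
    rw [hx] at ih
    simp only [List.mem_cons] at ih
    constructor
    · rintro (h | h)
      · exact ⟨c :: l0, Or.inl rfl, (hkey.1 h).isInfix⟩
      · rcases ih.1 h with ⟨seg, hm, hs⟩
        rcases hm with rfl | hm
        · exact ⟨c :: seg, Or.inl rfl, hs.trans (List.suffix_cons c seg).isInfix⟩
        · exact ⟨seg, Or.inr hm, hs⟩
    · rintro ⟨seg, hm, hs⟩
      rcases hm with rfl | hm
      · rcases List.infix_cons_iff.1 hs with h | h
        · exact Or.inl (hkey.2 h)
        · exact Or.inr (ih.2 ⟨l0, Or.inl rfl, h⟩)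
      · exact Or.inr (ih.2 ⟨seg, Or.inr hm, hs⟩)

lemma pvExists_peel (P : List Char → Prop) (hP : ¬ P []) (xs : List (List Char)) :
    (∃ x ∈ xs, P x) ↔ (∃ x ∈ pvPeel xs, P x) := by
  rcases pvPeel_spec xs with h | h
  · rw [← h]
  · conv_lhs => rw [h]
    simp only [List.mem_append, List.mem_singleton]
    constructor
    · rintro ⟨x, hm | hm, hx⟩
      · exact ⟨x, hm, hx⟩
      · subst hm; exact absurd hx hP
    · rintro ⟨x, hm, hx⟩; exact ⟨x, Or.inl hm, hx⟩

lemma pvExists_Fl (P : List Char → Prop) (hP : ¬ P []) (xs : List (List Char)) :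
    (∃ x ∈ xs, P x) ↔ (∃ x ∈ pvFl xs, P x) := by
  constructor
  · rintro ⟨x, hm, hx⟩
    have hne : ¬ x.isEmpty := by
      intro he
      rw [List.isEmpty_iff.1 he] at hx
      exact hP hx
    exact ⟨x, List.mem_filter.2 ⟨hm, by simpa using hne⟩, hx⟩
  · rintro ⟨x, hm, hx⟩
    exact ⟨x, (List.mem_filter.1 hm).1, hx⟩

lemma pvExists_splitAll_rem (t : List Char) (ht : t ≠ []) (htb : pvNB t)
    (P : List Char → Prop) (hP : ¬ P []) (s : List Char) :
    (∃ u ∈ pvSplitAll (pvRem t s), P u) ↔ (∃ u ∈ pvSplitAll s, P (pvRem t u)) := by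
  rw [pvExists_Fl P hP, (pvMain t ht htb s).2, ← pvExists_Fl P hP]
  constructor
  · rintro ⟨x, hm, hx⟩
    rcases List.mem_map.1 hm with ⟨u, hu, rfl⟩
    exact ⟨u, hu, hx⟩
  · rintro ⟨u, hu, hx⟩
    exact ⟨pvRem t u, List.mem_map.2 ⟨u, hu, rfl⟩, hx⟩

lemma pvFilterMap_Fl (F : List Char → Option (List Char)) (hF : F [] = none)
    (xs : List (List Char)) : (pvFl xs).filterMap F = xs.filterMap F := by
  induction xs with
  | nil => rfl
  | cons a xs ih =>
    rw [pvFl_cons]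
    by_cases ha : a.isEmpty
    · rw [if_pos ha, ih, List.filterMap_cons, List.isEmpty_iff.1 ha, hF]
    · rw [if_neg ha, List.filterMap_cons, List.filterMap_cons, ih]

lemma pvFilterMap_peel (F : List Char → Option (List Char)) (hF : F [] = none)
    (xs : List (List Char)) : (pvPeel xs).filterMap F = xs.filterMap F := by
  rcases pvPeel_spec xs with h | h
  · rw [← h]
  · conv_rhs => rw [h]
    rw [List.filterMap_append]
    simp [hF]

lemma pvFilterMap_splitAll_rem (t : List Char) (ht : t ≠ []) (htb : pvNB t)
    (F : List Char → Option (List Char)) (hF : F [] = none) (s : List Char) :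
    (pvSplitAll (pvRem t s)).filterMap F = (pvSplitAll s).filterMap (fun u => F (pvRem t u)) := by
  rw [← pvFilterMap_Fl F hF, (pvMain t ht htb s).2, pvFilterMap_Fl F hF, List.filterMap_map]
  rfl

lemma pvRstrip_all (l : List Char) :
    PySem.Chars.rstrip l = [] ↔ ∀ c ∈ l, PySem.Chars.isspace c = true := by
  have : PySem.Chars.rstrip l = (List.dropWhile PySem.Chars.isspace l.reverse).reverse := rfl
  rw [this]
  simp only [List.reverse_eq_nil_iff, List.dropWhile_eq_nil_iff, List.mem_reverse]

lemma pvRstrip_nil_iff (l : List Char) : PySem.Chars.rstrip l = [] ↔ PySem.Chars.strip l = [] := by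
  have hstrip : PySem.Chars.strip l = PySem.Chars.rstrip (List.dropWhile PySem.Chars.isspace l) := rfl
  rw [hstrip, pvRstrip_all, pvRstrip_all]
  constructor
  · intro h c hc
    exact h c ((List.dropWhile_sublist _).mem hc)
  · intro h c hc
    have hmem : c ∈ List.takeWhile PySem.Chars.isspace l ++ List.dropWhile PySem.Chars.isspace l := by
      rw [List.takeWhile_append_dropWhile]; exact hc
    rcases List.mem_append.1 hmem with h1 | h1
    · exact List.mem_takeWhile_imp h1
    · exact h c h1

lemma pvOfList_eq (s : String) (cs : List Char) (h : s.toList = cs) : s = String.ofList cs := by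
  subst h; exact String.ofList_toList.symm

-- token facts
lemma pvL1_ne : pvL1 ≠ [] := by decide
lemma pvL2_ne : pvL2 ≠ [] := by decide
lemma pvL3_ne : pvL3 ≠ [] := by decide
lemma pvNB_of_all {t : List Char} (h : t.all (fun c => !pvBrk c) = true) : pvNB t := by
  intro c hc
  have h2 := List.all_eq_true.1 h c hc
  simpa using h2

lemma pvNB1 : pvNB pvL1 := pvNB_of_all rfl
lemma pvNB2 : pvNB pvL2 := pvNB_of_all rfl
lemma pvNB3 : pvNB pvL3 := pvNB_of_all rfl
lemma pvNoInf1 : ¬ pvL1 <:+: [] := fun h => pvL1_ne (List.eq_nil_of_infix_nil h)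
lemma pvNoInf2 : ¬ pvL2 <:+: [] := fun h => pvL2_ne (List.eq_nil_of_infix_nil h)
lemma pvNoInf3 : ¬ pvL3 <:+: [] := fun h => pvL3_ne (List.eq_nil_of_infix_nil h)

-- Str/Chars bridges
lemma pvRS_eq (t s : String) (ht : t.toList ≠ []) :
    pvRS t s = String.ofList (pvRem t.toList s.toList) := by
  by_cases h : PySem.Str.isIn t s = true
  · rw [pvRS, if_pos h]
    apply pvOfList_eq
    rw [PySem.Str.toList_replace]
    have h0 : ("" : String).toList = [] := rfl
    rw [h0, pvReplace_eq _ _ ht]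
  · rw [pvRS, if_neg h]
    have hb : PySem.Str.isIn t s = false := by simpa using h
    rw [PySem.Str.isIn_eq] at hb
    rw [pvRem_of_not_infix _ _ ((PySem.Chars.isIn_eq_false_iff _ _).1 hb)]
    exact pvOfList_eq s s.toList rfl

lemma pvRS3_eq (o : String) :
    pvRS pyTOK3 (pvRS pyTOK2 (pvRS pyTOK1 o)) = String.ofList (pvRem3 o.toList) := by
  rw [pvRS_eq pyTOK1 o pvL1_ne, pvRS_eq pyTOK2 _ pvL2_ne, pvRS_eq pyTOK3 _ pvL3_ne]
  simp only [String.toList_ofList]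
  rfl

lemma pvSplitlines_str (o : String) :
    PySem.Str.splitlines o = (pvPeel (pvSplitAll o.toList)).map String.ofList := by
  have h : PySem.Str.splitlines o = (PySem.Chars.splitlines o.toList).map String.ofList := rfl
  rw [h, pvSplitlines_eq]

lemma pvStrRstrip_ofList (cs : List Char) :
    PySem.Str.rstrip (String.ofList cs) = String.ofList (PySem.Chars.rstrip cs) :=
  pvOfList_eq _ _ (by simp)

lemma pvIsIn_ofList (t : String) (cs : List Char) :
    PySem.Str.isIn t (String.ofList cs) = PySem.Chars.isIn t.toList cs := by
  rw [PySem.Str.isIn_eq, String.toList_ofList]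

lemma pvBeq_empty_ofList (cs : List Char) :
    (String.ofList cs == "") = decide (cs = []) := by
  rw [Bool.eq_iff_iff]
  simp only [beq_iff_eq, decide_eq_true_eq]
  constructor
  · intro h
    have : (String.ofList cs).toList = [] := by rw [h]; rfl
    simpa using this
  · rintro rfl; rfl

lemma pvFC0_nil : pvFC0 [] = none := rfl

lemma pvRem3_nil : pvRem3 [] = [] := by
  simp [pvRem3, pvRem_nil]

lemma pvFB_ofList (cs : List Char) :
    pvFB (String.ofList cs) = Option.map String.ofList (pvFC0 (pvRem3 cs)) := by
  unfold pvFB pvFC0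
  rw [show pvRS pyTOK3 (pvRS pyTOK2 (pvRS pyTOK1 (String.ofList cs))) =
        String.ofList (pvRem3 (String.ofList cs).toList) from pvRS3_eq _,
      String.toList_ofList, pvStrRstrip_ofList, pvBeq_empty_ofList]
  by_cases hv : PySem.Chars.rstrip (pvRem3 cs) = []
  · rw [if_pos (by simpa using hv), if_pos hv]; rfl
  · rw [if_neg (by simpa using hv), if_neg hv]; rfl

lemma pvMapFilter {α β : Type} (p : α → Bool) (f : α → β) (xs : List α) :
    (xs.filter p).map f = xs.filterMap (fun x => if p x then some (f x) else none) := by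
  induction xs with
  | nil => rfl
  | cons a xs ih =>
    rw [List.filter_cons, List.filterMap_cons]
    by_cases ha : p a
    · rw [if_pos ha, if_pos ha, List.map_cons, ih]
    · rw [if_neg ha, if_neg ha, ih]

lemma pvPC_eq (u : List Char) :
    (!(PySem.Str.strip (String.ofList u) == "")) = !(decide (PySem.Chars.strip u = [])) := by
  have h1 : PySem.Str.strip (String.ofList u) = String.ofList (PySem.Chars.strip u) :=
    pvOfList_eq _ _ (by simp)
  rw [h1, pvBeq_empty_ofList]

lemma pvFC0_eq (u : List Char) :
    (if (!(decide (PySem.Chars.strip u = []))) = true then some (PySem.Chars.rstrip u) else none) =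
      pvFC0 u := by
  unfold pvFC0
  by_cases h : PySem.Chars.strip u = []
  · rw [if_neg (by simp [h]), if_pos ((pvRstrip_nil_iff u).2 h)]
  · rw [if_pos (by simp [h]), if_neg (fun hc => h ((pvRstrip_nil_iff u).1 hc))]

lemma pvFC0_rem3_nil : pvFC0 (pvRem3 []) = none := by rw [pvRem3_nil]; rfl

set_option maxHeartbeats 2000000 in
lemma pvLines (o : String) :
    ((PySem.Str.splitlines (pvRS pyTOK3 (pvRS pyTOK2 (pvRS pyTOK1 o)))).filter
        (fun ln => !(PySem.Str.strip ln == ""))).map PySem.Str.rstrip =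
      (PySem.Str.splitlines o).filterMap pvFB := by
  rw [pvRS3_eq o, pvSplitlines_str, String.toList_ofList, pvSplitlines_str o]
  rw [List.filter_map, List.map_map]
  have hL : ∀ (xs : List (List Char)),
      (xs.filter ((fun ln => !(PySem.Str.strip ln == "")) ∘ String.ofList)).map
          (PySem.Str.rstrip ∘ String.ofList) =
        List.map String.ofList (xs.filterMap pvFC0) := by
    intro xs
    rw [List.filter_congr (fun u _ => by
      show ((fun ln => !(PySem.Str.strip ln == "")) ∘ String.ofList) u = (fun u => !(decide (PySem.Chars.strip u = []))) u
      exact pvPC_eq u)]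
    rw [List.map_congr_left (fun u _ => by
      show (PySem.Str.rstrip ∘ String.ofList) u = (String.ofList ∘ PySem.Chars.rstrip) u
      exact pvStrRstrip_ofList u)]
    rw [← List.map_map, pvMapFilter]
    rw [List.filterMap_congr (fun u _ => pvFC0_eq u)]
  rw [hL]
  have hR : ∀ (P0 : List (List Char)), (P0.map String.ofList).filterMap pvFB =
      List.map String.ofList (P0.filterMap (fun u => pvFC0 (pvRem3 u))) := by
    intro P0
    induction P0 with
    | nil => rfl
    | cons a P ih =>
      rw [List.map_cons, List.filterMap_cons, List.filterMap_cons, pvFB_ofList a, ih]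
      cases pvFC0 (pvRem3 a) with
      | none => rfl
      | some v => rfl
  rw [hR (pvPeel (pvSplitAll o.toList))]
  congr 1
  rw [pvFilterMap_peel pvFC0 pvFC0_nil, pvFilterMap_peel _ (by exact pvFC0_rem3_nil)]
  unfold pvRem3
  rw [pvFilterMap_splitAll_rem pvL3 pvL3_ne pvNB3 pvFC0 pvFC0_nil,
      pvFilterMap_splitAll_rem pvL2 pvL2_ne pvNB2 _ (by rw [pvRem_nil]; rfl),
      pvFilterMap_splitAll_rem pvL1 pvL1_ne pvNB1 _ (by rw [pvRem_nil, pvRem_nil]; rfl)]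

set_option maxHeartbeats 2000000 in
lemma pvFlag1 (o : String) : pvA1 o = (PySem.Str.splitlines o).any pvA1 := by
  rw [pvSplitlines_str o, List.any_map, Bool.eq_iff_iff, List.any_eq_true]
  have key : ∀ cs : List Char, ((pvA1 ∘ String.ofList) cs = true) ↔ pvL1 <:+: cs := by
    intro cs
    show pvA1 (String.ofList cs) = true ↔ _
    rw [pvA1, pvIsIn_ofList]
    exact PySem.Chars.isIn_iff_infix _ _
  simp only [key]
  rw [show pvA1 o = PySem.Chars.isIn pvL1 o.toList from by rw [pvA1, PySem.Str.isIn_eq]; rfl]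
  rw [PySem.Chars.isIn_iff_infix, pvInfix_splitAll pvL1 pvL1_ne pvNB1]
  exact pvExists_peel _ pvNoInf1 _

set_option maxHeartbeats 2000000 in
lemma pvFlag2 (o : String) : pvA2 o = (PySem.Str.splitlines o).any pvA2 := by
  rw [pvSplitlines_str o, List.any_map, Bool.eq_iff_iff, List.any_eq_true]
  have key : ∀ cs : List Char, ((pvA2 ∘ String.ofList) cs = true) ↔ pvL2 <:+: pvRem pvL1 cs := by
    intro cs
    show pvA2 (String.ofList cs) = true ↔ _
    rw [pvA2, pvRS_eq pyTOK1 _ pvL1_ne, pvIsIn_ofList, String.toList_ofList]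
    exact PySem.Chars.isIn_iff_infix _ _
  simp only [key]
  rw [show pvA2 o = PySem.Chars.isIn pvL2 (pvRem pvL1 o.toList) from by
    rw [pvA2, pvRS_eq pyTOK1 o pvL1_ne, pvIsIn_ofList]; rfl]
  rw [PySem.Chars.isIn_iff_infix, pvInfix_splitAll pvL2 pvL2_ne pvNB2,
    pvExists_splitAll_rem pvL1 pvL1_ne pvNB1 _ pvNoInf2]
  exact pvExists_peel _ (by rw [pvRem_nil]; exact pvNoInf2) _

set_option maxHeartbeats 2000000 in
lemma pvFlag3 (o : String) : pvA3 o = (PySem.Str.splitlines o).any pvA3 := by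
  rw [pvSplitlines_str o, List.any_map, Bool.eq_iff_iff, List.any_eq_true]
  have key : ∀ cs : List Char,
      ((pvA3 ∘ String.ofList) cs = true) ↔ pvL3 <:+: pvRem pvL2 (pvRem pvL1 cs) := by
    intro cs
    show pvA3 (String.ofList cs) = true ↔ _
    rw [pvA3, pvRS_eq pyTOK1 _ pvL1_ne, pvRS_eq pyTOK2 _ pvL2_ne, pvIsIn_ofList,
      String.toList_ofList, String.toList_ofList]
    exact PySem.Chars.isIn_iff_infix _ _
  simp only [key]
  rw [show pvA3 o = PySem.Chars.isIn pvL3 (pvRem pvL2 (pvRem pvL1 o.toList)) from by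
    rw [pvA3, pvRS_eq pyTOK1 o pvL1_ne, pvRS_eq pyTOK2 _ pvL2_ne, String.toList_ofList,
      pvIsIn_ofList]; rfl]
  rw [PySem.Chars.isIn_iff_infix, pvInfix_splitAll pvL3 pvL3_ne pvNB3,
    pvExists_splitAll_rem pvL2 pvL2_ne pvNB2 _ pvNoInf3,
    pvExists_splitAll_rem pvL1 pvL1_ne pvNB1 _ (by rw [pvRem_nil]; exact pvNoInf3)]
  exact pvExists_peel _ (by rw [pvRem_nil, pvRem_nil]; exact pvNoInf3) _

lemma pvCondFlag (c f : Bool) : (if c = true then true else f) = (f || c) := by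
  cases c <;> simp

lemma pvStepA_eq (fd : PySem.Set String) (s t : String) :
    pyStepA (fd, s) t = ((if PySem.Str.isIn t s = true then PySem.Set.add fd t else fd), pvRS t s) := by
  unfold pyStepA pvRS
  dsimp only
  by_cases h : PySem.Str.isIn t s = true
  · rw [if_pos h, if_pos h, if_pos h]
  · rw [if_neg h, if_neg h, if_neg h]

lemma pvFoldA (o : String) :
    List.foldl pyStepA (PySem.Set.empty, o) pyTokenValues =
    (pvFound (pvA1 o) (pvA2 o) (pvA3 o), pvRS pyTOK3 (pvRS pyTOK2 (pvRS pyTOK1 o))) := by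
  simp only [pyTokenValues, List.foldl_cons, List.foldl_nil]
  rw [pvStepA_eq, pvStepA_eq, pvStepA_eq]
  rfl

set_option maxHeartbeats 2000000 in
lemma pvFoldB (L : List String) : ∀ (kept : List String) (f1 f2 f3 : Bool),
    List.foldl pyStepB (kept, f1, f2, f3) L =
    (kept ++ L.filterMap pvFB, f1 || L.any pvA1, f2 || L.any pvA2, f3 || L.any pvA3) := by
  induction L with
  | nil => intro kept f1 f2 f3; simp
  | cons ln L ih =>
    intro kept f1 f2 f3
    rw [List.foldl_cons]
    have hstep : pyStepB (kept, f1, f2, f3) ln =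
        ((if (PySem.Str.rstrip (pvRS pyTOK3 (pvRS pyTOK2 (pvRS pyTOK1 ln))) == "") = true then kept
          else kept ++ [PySem.Str.rstrip (pvRS pyTOK3 (pvRS pyTOK2 (pvRS pyTOK1 ln)))]),
         f1 || pvA1 ln, f2 || pvA2 ln, f3 || pvA3 ln) := by
      unfold pyStepB
      dsimp only
      rw [pvCondFlag, pvCondFlag, pvCondFlag]
      rfl
    rw [hstep, ih]
    rw [List.filterMap_cons]
    have hfb : pvFB ln = if PySem.Str.rstrip (pvRS pyTOK3 (pvRS pyTOK2 (pvRS pyTOK1 ln))) == ""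
        then none else some (PySem.Str.rstrip (pvRS pyTOK3 (pvRS pyTOK2 (pvRS pyTOK1 ln)))) := rfl
    rw [hfb]
    by_cases hv : PySem.Str.rstrip (pvRS pyTOK3 (pvRS pyTOK2 (pvRS pyTOK1 ln))) == ""
    · rw [if_pos hv, if_pos hv]
      simp [List.any_cons, pvA1, pvA2, pvA3, Bool.or_assoc]
    · rw [if_neg hv, if_neg hv]
      simp [List.any_cons, pvA1, pvA2, pvA3, Bool.or_assoc]

lemma pvFoundEq (f1 f2 f3 : Bool) :
    pvFound f1 f2 f3 =
      PySem.Set.ofList ((([(pyTOK1, f1), (pyTOK2, f2), (pyTOK3, f3)]).filter (fun p => p.2)).map (fun p => p.1)) := by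
  cases f1 <;> cases f2 <;> cases f3 <;> decide

-- ===== VERDICT (by name: the statement is the Claim_ definition above) =====
theorem strip_tokens_spec : Claim_equal_strip_tokens := by
  intro text _
  unfold Spec_strip_tokens strip_tokens strip_tokens_alt
  dsimp only
  rw [pvFoldA, pvFoldB]
  simp only [List.nil_append, Bool.false_or]
  rw [pvLines, pvFlag1 , pvFlag2, pvFlag3, pvFoundEq]
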